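-- pv_equiv track=rewrite | github.com/pppk520/miscellaneous | ib/level_7/dynamic_programming/avgset.py | get_compliment
-- ===== SOURCE A (Python) =====
-- def get_compliment(arr, target_arr):
--     ret = []
--     target = target_arr[:]
--
--     for v in arr:
--         if v not in target:
--             ret.append(v)
--         else:
--             target.remove(v)
--
--     return ret
-- ===== SOURCE B (Python) =====
-- def get_compliment(arr, target_arr):
--     ret = arr[:]
--     for t in target_arr:
--         if t in ret:
--             ret.remove(t)
--     return ret
-- ===== Notes on version B (the rewrite author's own statement) =====
-- stated objective: alternative
-- what changed: B flips the pass: instead of scanning arr while consuming a copy of target_arr, B copies arr and scans target_arr, deleting the first occurrence of each target element from the copy.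
import Mathlib
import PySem

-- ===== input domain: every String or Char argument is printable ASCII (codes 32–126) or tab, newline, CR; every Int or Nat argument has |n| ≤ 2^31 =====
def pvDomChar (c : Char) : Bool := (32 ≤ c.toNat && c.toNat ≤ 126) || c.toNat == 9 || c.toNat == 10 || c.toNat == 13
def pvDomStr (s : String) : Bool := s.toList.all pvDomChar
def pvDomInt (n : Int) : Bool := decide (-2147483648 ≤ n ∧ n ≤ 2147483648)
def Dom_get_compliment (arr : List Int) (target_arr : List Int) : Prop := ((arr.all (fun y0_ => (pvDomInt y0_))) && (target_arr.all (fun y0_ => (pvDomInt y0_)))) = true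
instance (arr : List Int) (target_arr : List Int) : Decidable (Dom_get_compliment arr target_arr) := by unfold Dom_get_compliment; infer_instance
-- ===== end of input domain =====

-- B flips the pass: instead of scanning arr while consuming a copy of target_arr, B copies arr
-- and scans target_arr, removing the first occurrence of each target element from the copy
-- (an alternative decomposition, same cost; A's argument lists are not mutated by either version).

-- ===== PORT A =====
-- state = (ret, target); the else-branch runs only when v ∈ target, so list.remove cannot raise
-- and `(remove? …).getD` keeps the list total without changing the Python value.
def get_compliment (arr : List Int) (target_arr : List Int) : List Int :=
  (arr.foldl (fun st v =>
      if v ∉ st.2 then (st.1 ++ [v], st.2)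
      else (st.1, (PySem.List.remove? st.2 v).getD st.2))
    (([] : List Int), target_arr)).1

-- ===== PORT B =====
-- ret = arr[:]; for t in target_arr: if t in ret: ret.remove(t)  (guarded, so remove cannot raise)
def get_compliment_alt (arr : List Int) (target_arr : List Int) : List Int :=
  target_arr.foldl (fun ret t =>
      if t ∈ ret then (PySem.List.remove? ret t).getD ret else ret)
    arr

-- ===== PRECONDITION & SPEC =====
def Spec_get_compliment (arr : List Int) (target_arr : List Int) (out : List Int) : Prop := out = get_compliment_alt arr target_arr
instance (arr : List Int) (target_arr : List Int) (out : List Int) : Decidable (Spec_get_compliment arr target_arr out) := by unfold Spec_get_compliment; infer_instance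

-- ===== CLAIM (what is proved, stated in full; the proofs are below) =====
def Claim_equal_get_compliment : Prop := ∀ (arr : List Int) (target_arr : List Int), Dom_get_compliment arr target_arr → Spec_get_compliment arr target_arr (get_compliment arr target_arr)

-- ===== LEMMAS AND PROOFS =====

-- guarded remove is exactly erase (and the identity when the element is absent)
theorem removeGetD_eq_erase (l : List Int) (v : Int) :
    (PySem.List.remove? l v).getD l = l.erase v := by
  by_cases h : v ∈ l
  · rw [PySem.List.remove?_eq_some_erase l v h]; rfl
  · rw [(PySem.List.remove?_eq_none_iff l v).2 h, List.erase_of_not_mem h]; rfl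

-- clean structural description of A's loop
def gA : List Int → List Int → List Int
  | [], _ => []
  | v :: vs, target => if v ∈ target then gA vs (target.erase v) else v :: gA vs target

theorem foldlA_eq_gA (arr : List Int) (ret target : List Int) :
    (arr.foldl (fun st v =>
        if v ∉ st.2 then (st.1 ++ [v], st.2)
        else (st.1, (PySem.List.remove? st.2 v).getD st.2)) (ret, target)).1
      = ret ++ gA arr target := by
  induction arr generalizing ret target with
  | nil => simp [gA]
  | cons v vs ih =>
    by_cases h : v ∈ target
    · simp only [List.foldl_cons, if_neg (not_not_intro h)]
      rw [removeGetD_eq_erase target v, ih, gA, if_pos h]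
    · simp only [List.foldl_cons, if_pos h]
      rw [ih, gA, if_neg h, List.append_assoc]
      rfl

theorem gA_nil_target (arr : List Int) : gA arr [] = arr := by
  induction arr with
  | nil => rfl
  | cons v vs ih => simp [gA, ih]

-- key commutation: consuming one target element up front
theorem gA_cons_target (arr : List Int) (t : Int) (ts : List Int) :
    gA arr (t :: ts) = gA (if t ∈ arr then arr.erase t else arr) ts := by
  induction arr generalizing t ts with
  | nil => simp [gA]
  | cons v vs ih =>
    by_cases hvt : v = t
    · subst hvt
      simp [gA, List.erase_cons_head]
    · have htv : ¬((t == v) = true) := by simpa using (Ne.symm hvt : t ≠ v)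
      have hvt' : ¬((v == t) = true) := by simpa using hvt
      by_cases hv : v ∈ ts
      · have hmem : v ∈ t :: ts := List.mem_cons_of_mem _ hv
        rw [gA, if_pos hmem, List.erase_cons_tail htv, ih]
        by_cases ht : t ∈ vs
        · rw [if_pos ht, if_pos (List.mem_cons_of_mem _ ht),
            List.erase_cons_tail hvt', gA, if_pos hv]
        · rw [if_neg ht, if_neg (by simp [Ne.symm hvt, ht]), gA, if_pos hv]
      · have hnmem : v ∉ t :: ts := by simp [hvt, hv]
        rw [gA, if_neg hnmem, ih]
        by_cases ht : t ∈ vs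
        · rw [if_pos ht, if_pos (List.mem_cons_of_mem _ ht),
            List.erase_cons_tail hvt', gA, if_neg hv]
        · rw [if_neg ht, if_neg (by simp [Ne.symm hvt, ht]), gA, if_neg hv]

theorem gA_eq_alt (target arr : List Int) :
    gA arr target = get_compliment_alt arr target := by
  induction target generalizing arr with
  | nil => simpa [get_compliment_alt] using gA_nil_target arr
  | cons t ts ih =>
    rw [gA_cons_target, ih]
    simp only [get_compliment_alt, List.foldl_cons, removeGetD_eq_erase]

-- ===== VERDICT (by name: the statement is the Claim_ definition above) =====
theorem get_compliment_spec : Claim_equal_get_compliment := by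
  intro arr target_arr _
  unfold Spec_get_compliment get_compliment
  rw [foldlA_eq_gA, gA_eq_alt, List.nil_append]
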